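-- pv_equiv track=rewrite | github.com/GeorgesNass/data-deduplication | src/utils/utils_core.py | list_substrs_included
-- ===== SOURCE A (Python) =====
-- from typing import Any, Callable, Iterator, List, Sequence, TypeVar
--
-- def list_substrs_included(substrings: Sequence[str], text: str) -> List[str]:
--     """
--         Return substrings that are included in a target string
--
--         Args:
--             substrings: List of candidate substrings
--             text: Target string
--
--         Returns:
--             List of substrings present in text
--     """
--
--     if not text:
--         return []
--
--     found: List[str] = []
--     for sub in substrings:
--         if sub and sub in text:
--             found.append(sub)
--
--     return found
-- ===== SOURCE B (Python) =====
-- def list_substrs_included(substrings, text):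
--     # Alternative strategy: precompute ONE index (the set of all substrings of
--     # text up to the longest candidate length), then answer each candidate by a
--     # single set lookup instead of scanning text once per candidate.
--     maxlen = max((len(s) for s in substrings), default=0)
--     window = {text[i:i + L] for i in range(len(text)) for L in range(1, maxlen + 1)}
--     return [s for s in substrings if s in window]
-- ===== Notes on version B (the rewrite author's own statement) =====
-- stated objective: faster
-- what changed: B precomputes one set of all substrings of text up to the longest candidate length and answers each candidate by a single set lookup, instead of A's scan of text per candidate.
import Mathlib
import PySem

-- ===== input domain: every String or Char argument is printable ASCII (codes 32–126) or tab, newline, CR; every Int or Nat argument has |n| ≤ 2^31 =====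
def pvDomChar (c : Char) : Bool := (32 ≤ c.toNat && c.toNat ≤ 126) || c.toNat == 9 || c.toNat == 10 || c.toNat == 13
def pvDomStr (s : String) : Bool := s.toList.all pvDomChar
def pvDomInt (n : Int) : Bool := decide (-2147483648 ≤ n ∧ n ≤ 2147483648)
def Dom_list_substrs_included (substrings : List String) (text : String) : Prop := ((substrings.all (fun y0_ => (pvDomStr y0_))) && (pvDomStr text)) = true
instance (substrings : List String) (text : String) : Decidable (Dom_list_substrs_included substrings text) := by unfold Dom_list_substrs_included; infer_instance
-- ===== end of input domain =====

-- B replaces A's per-candidate scan of text with one precomputed substring index; return values proved equal on all inputs.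


-- ===== PORT A =====
def list_substrs_included (substrings : List String) (text : String) : List String :=
  if text = "" then []
  else substrings.foldl
    (fun found sub => if (!(sub == "")) && PySem.Str.isIn sub text then found ++ [sub] else found)
    []

-- ===== PORT B =====
-- max((len(s) for s in substrings), default=0)
def pvMaxLen (substrings : List String) : Int :=
  substrings.foldl (fun m s => max m (PySem.Str.len s)) 0

-- {text[i:i+L] for i in range(len(text)) for L in range(1, maxlen+1)}
def pvWindow (text : String) (maxlen : Int) : PySem.Set String :=
  (PySem.List.pyRange 0 (PySem.Str.len text)).foldl
    (fun acc i =>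
      (PySem.List.pyRange 1 (maxlen + 1)).foldl
        (fun acc L => acc.add (PySem.Str.slice text (some i) (some (i + L)))) acc)
    PySem.Set.empty

def list_substrs_included_alt (substrings : List String) (text : String) : List String :=
  substrings.filter (fun s => (pvWindow text (pvMaxLen substrings)).contains s)

-- ===== PRECONDITION & SPEC =====
def Spec_list_substrs_included (substrings : List String) (text : String) (out : List String) : Prop := out = list_substrs_included_alt substrings text
instance (substrings : List String) (text : String) (out : List String) : Decidable (Spec_list_substrs_included substrings text out) := by unfold Spec_list_substrs_included; infer_instance

-- ===== CLAIM (what is proved, stated in full; the proofs are below) =====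
def Claim_equal_list_substrs_included : Prop := ∀ (substrings : List String) (text : String), Dom_list_substrs_included substrings text → Spec_list_substrs_included substrings text (list_substrs_included substrings text)

-- ===== LEMMAS AND PROOFS =====

-- a set built by folding `add` over a list collects exactly the images
theorem mem_foldl_add_inner {α β : Type} [BEq α] [LawfulBEq α] (l2 : List β) (f : β → α) (acc : PySem.Set α) (y : α) :
    y ∈ l2.foldl (fun a L => a.add (f L)) acc ↔ y ∈ acc ∨ ∃ L ∈ l2, y = f L := by
  rw [← PySem.Set.update_map_eq_foldl_add, PySem.Set.mem_update]
  simp [eq_comm]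

-- membership in a doubly nested add-fold
theorem mem_nested {α β γ : Type} [BEq α] [LawfulBEq α] (l1 : List β) (l2 : List γ) (g : β → γ → α) (s0 : PySem.Set α) (y : α) :
    y ∈ l1.foldl (fun acc i => l2.foldl (fun a L => a.add (g i L)) acc) s0 ↔
      y ∈ s0 ∨ ∃ i ∈ l1, ∃ L ∈ l2, y = g i L := by
  induction l1 generalizing s0 with
  | nil => simp
  | cons i l1 ih => rw [List.foldl_cons, ih, mem_foldl_add_inner]; simp; rw [or_assoc]

-- membership in the window: exactly the slices text[i:i+L], 0 <= i < len text, 1 <= L <= maxlen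
theorem mem_pvWindow (text : String) (maxlen : Int) (s : String) :
    s ∈ pvWindow text maxlen ↔
      ∃ i L : Int, 0 ≤ i ∧ i < PySem.Str.len text ∧ 1 ≤ L ∧ L ≤ maxlen ∧
        s = PySem.Str.slice text (some i) (some (i + L)) := by
  unfold pvWindow
  rw [mem_nested]
  simp only [PySem.Set.empty, List.not_mem_nil, false_or, PySem.List.mem_pyRange_one]
  constructor
  · rintro ⟨i, ⟨h1, h2⟩, L, ⟨h3, h4⟩, h5⟩
    exact ⟨i, L, h1, h2, h3, by omega, h5⟩
  · rintro ⟨i, L, h1, h2, h3, h4, h5⟩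
    exact ⟨i, ⟨h1, h2⟩, L, ⟨h3, by omega⟩, h5⟩

-- each candidate length is bounded by pvMaxLen
theorem len_le_pvMaxLen (substrings : List String) (s : String) (hs : s ∈ substrings) :
    PySem.Str.len s ≤ pvMaxLen substrings := by
  unfold pvMaxLen
  have h : List.foldl (fun m s => max m (PySem.Str.len s)) 0 substrings
      = List.foldl max 0 (substrings.map PySem.Str.len) := List.foldl_map.symm
  rw [h]
  exact (PySem.List.le_foldl_max _ 0).2 _ (List.mem_map_of_mem hs)

-- the pointwise fact: for a candidate of bounded length, window lookup = (nonempty and substring)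
theorem contains_pvWindow_eq (text : String) (maxlen : Int) (s : String)
    (hlen : PySem.Str.len s ≤ maxlen) :
    (pvWindow text maxlen).contains s = ((!(s == "")) && PySem.Str.isIn s text) := by
  rw [Bool.eq_iff_iff, PySem.Set.contains_iff, mem_pvWindow]
  simp only [Bool.and_eq_true, Bool.not_eq_true', beq_eq_false_iff_ne, ne_eq]
  rw [PySem.Str.isIn_eq, ← PySem.Chars.exists_prefix_drop_iff_isIn]
  constructor
  · rintro ⟨i, L, h0i, hin, h1L, hLm, rfl⟩
    have hslice : (PySem.Str.slice text (some i) (some (i + L))).toList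
        = (text.toList.drop i.toNat).take L.toNat := by
      rw [PySem.Str.toList_slice, PySem.Chars.slice_eq_listSlice,
        PySem.List.slice_toNat _ h0i (by omega)]
      congr 1
      omega
    have hin' : i.toNat < text.toList.length := by
      have := PySem.Str.len_eq text; omega
    have hdrop : text.toList.drop i.toNat ≠ [] := by
      rw [ne_eq, List.drop_eq_nil_iff]; omega
    constructor
    · intro hcon
      have : (PySem.Str.slice text (some i) (some (i + L))).toList = [] := by
        rw [hcon]; rfl
      rw [hslice, List.take_eq_nil_iff] at this
      rcases this with h | h
      · omega
      · exact hdrop h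
    · exact ⟨i.toNat, by rw [hslice]; exact List.take_prefix _ _⟩
  · rintro ⟨hne, j, hpre⟩
    have hsl : s.toList ≠ [] := by
      intro h; apply hne; rw [← String.toList_inj]; simpa using h
    have hj : j < text.toList.length := by
      by_contra h
      have : text.toList.drop j = [] := List.drop_eq_nil_of_le (by omega)
      rw [this] at hpre
      exact hsl (List.prefix_nil.mp hpre)
    have hlen' : PySem.Str.len s = (s.toList.length : Int) := PySem.Str.len_eq s
    have hpos : 0 < s.toList.length := List.length_pos_iff.mpr hsl
    have hb1 : (1 : Int) ≤ (s.toList.length : Int) := by exact_mod_cast hpos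
    have hb2 : ((s.toList.length : Int)) ≤ maxlen := by omega
    have hb3 : ((j : Int)) < PySem.Str.len text := by
      have := PySem.Str.len_eq text; omega
    refine ⟨(j : Int), (s.toList.length : Int), by omega, hb3, hb1, hb2, ?_⟩
    rw [← String.toList_inj, PySem.Str.toList_slice, PySem.Chars.slice_eq_listSlice,
      PySem.List.slice_toNat _ (by omega) (by omega)]
    have harg : ((j : Int) + (s.toList.length : Int)).toNat - ((j : Int)).toNat
        = s.toList.length := by omega
    have hj' : ((j : Int)).toNat = j := by omega
    rw [harg, hj']
    exact List.prefix_iff_eq_take.mp hpre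

-- ===== VERDICT (by name: the statement is the Claim_ definition above) =====
theorem list_substrs_included_spec : Claim_equal_list_substrs_included := by
  intro substrings text _
  unfold Spec_list_substrs_included list_substrs_included list_substrs_included_alt
  by_cases ht : text = ""
  · subst ht
    rw [if_pos rfl]
    have hw : pvWindow "" (pvMaxLen substrings) = PySem.Set.empty := by
      unfold pvWindow
      rw [PySem.List.pyRange_one_eq_nil
        (a := 0) (b := PySem.Str.len "") (by simp [PySem.Str.len_eq])]
      rfl
    rw [hw]
    simp [PySem.Set.empty, PySem.Set.contains]
  · rw [if_neg ht, PySem.List.foldl_append_if_eq_filter, List.nil_append]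
    refine List.filter_congr ?_
    intro s hs
    exact (contains_pvWindow_eq text (pvMaxLen substrings) s
      (len_le_pvMaxLen substrings s hs)).symm
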